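-- pv_equiv track=rewrite | github.com/Carson7822/Python-Fundamentals-CSE174 | Lectures,Tests,Etc/problem_solving.py | tenRun
-- ===== SOURCE A (Python) =====
-- def tenRun(numbers : list) -> list:
--     count = 0
--
--     for i in range(len(numbers)):
--         if (numbers[i] % 10 == 0):
--             count += 1
--             if numbers[i] == 10:
--                 replacevar = 10
--             else:
--                 replacevar = 20
--
--         if (count > 0):
--             numbers[i] = replacevar
--
--     return numbers  # Temporary return
-- ===== SOURCE B (Python) =====
-- def tenRun(numbers : list) -> list:
--     # Two-pass: collect mark indices, then rebuild as prefix + constant segments;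
--     # mutates numbers in place via slice assignment and returns the same object.
--     marks = []
--     for i, x in enumerate(numbers):
--         if x % 10 == 0:
--             marks.append(i)
--     if not marks:
--         return numbers
--     out = numbers[:marks[0]]
--     for m, nxt in zip(marks, marks[1:] + [len(numbers)]):
--         val = 10 if numbers[m] == 10 else 20
--         out.extend([val] * (nxt - m))
--     numbers[:] = out
--     return numbers
-- ===== Notes on version B (the rewrite author's own statement) =====
-- stated objective: alternative
-- what changed: Replaces A's stateful per-element loop (count/replacevar carried across iterations) with a two-pass rebuild: first collect the indices of multiples of 10, then emit the untouched prefix plus one constant segment per mark, assigned back into the list.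
import Mathlib
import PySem

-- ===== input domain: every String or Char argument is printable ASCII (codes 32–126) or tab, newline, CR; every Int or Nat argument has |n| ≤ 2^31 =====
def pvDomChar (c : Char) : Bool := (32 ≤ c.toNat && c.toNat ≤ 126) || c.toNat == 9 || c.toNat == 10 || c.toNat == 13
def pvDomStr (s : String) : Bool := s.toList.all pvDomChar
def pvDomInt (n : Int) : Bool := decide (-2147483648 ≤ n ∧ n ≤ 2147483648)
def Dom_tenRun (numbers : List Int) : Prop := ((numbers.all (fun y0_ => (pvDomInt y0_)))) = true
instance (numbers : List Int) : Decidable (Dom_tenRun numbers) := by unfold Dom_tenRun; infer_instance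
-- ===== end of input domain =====

-- B rebuilds the list from mark indices as a prefix plus constant segments (two passes)
-- instead of A's stateful per-element loop; objective: alternative decomposition, same cost.
-- Both Pythons mutate the argument list in place; the equivalence proved here is about the return value.

-- ===== PORT A =====
-- the loop 'for i in range(len(numbers))' reads numbers[i] before writing it, so it is the
-- obvious structural recursion over the list carrying the state (count, replacevar)
def tenRunGoA : Int → Int → List Int → List Int
  | _, _, [] => []
  | count, rv, x :: rest =>
    if PySem.Int.mod x 10 = 0 then
      let rv' : Int := if x = 10 then 10 else 20
      (if count + 1 > 0 then rv' else x) :: tenRunGoA (count + 1) rv' rest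
    else
      (if count > 0 then rv else x) :: tenRunGoA count rv rest

def tenRun (numbers : List Int) : List Int :=
  tenRunGoA 0 0 numbers  -- replacevar unset in Python before the first mark; 0 is never read (count > 0 only after it is set)

-- ===== PORT B =====
-- 'for i, x in enumerate(numbers): if x % 10 == 0: marks.append(i)' as structural recursion on the list
def marksGoB : Nat → List Int → List Nat
  | _, [] => []
  | i, x :: rest =>
    if PySem.Int.mod x 10 = 0 then i :: marksGoB (i + 1) rest else marksGoB (i + 1) rest

def tenRun_alt (numbers : List Int) : List Int :=
  let marks := marksGoB 0 numbers
  match marks with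
  | [] => numbers
  | m0 :: ms =>
    ((m0 :: ms).zip (ms ++ [numbers.length])).foldl
      (fun out p =>
        out ++ List.replicate (p.2 - p.1)
          (if numbers.getD p.1 0 = 10 then (10 : Int) else 20))  -- numbers[m] is in range: m is an index of numbers
      (numbers.take m0)

-- ===== PRECONDITION & SPEC =====
def Spec_tenRun (numbers : List Int) (out : List Int) : Prop := out = tenRun_alt numbers
instance (numbers : List Int) (out : List Int) : Decidable (Spec_tenRun numbers out) := by unfold Spec_tenRun; infer_instance

-- ===== CLAIM (what is proved, stated in full; the proofs are below) =====
def Claim_equal_tenRun : Prop := ∀ (numbers : List Int), Dom_tenRun numbers → Spec_tenRun numbers (tenRun numbers)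

-- ===== LEMMAS AND PROOFS =====

def pvVal (x : Int) : Int := if x = 10 then 10 else 20

def pvSeg (xs : List Int) (p : Nat × Nat) : List Int :=
  List.replicate (p.2 - p.1) (pvVal (xs.getD p.1 0))

-- canonical single scan both ports are reduced to
def pvGo : Option Int → List Int → List Int
  | _, [] => []
  | s, x :: rest =>
    if PySem.Int.mod x 10 = 0 then pvVal x :: pvGo (some (pvVal x)) rest
    else match s with
      | some v => v :: pvGo (some v) rest
      | none => x :: pvGo none rest

def pvRender (xs : List Int) : List Int :=
  match marksGoB 0 xs with
  | [] => xs
  | m0 :: ms => xs.take m0 ++ ((m0 :: ms).zip (ms ++ [xs.length])).flatMap (pvSeg xs)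

lemma tenRunGoA_pos (xs : List Int) : ∀ (c rv : Int), 0 < c →
    tenRunGoA c rv xs = pvGo (some rv) xs := by
  induction xs with
  | nil => intro c rv _; rfl
  | cons x rest ih =>
    intro c rv hc
    simp only [tenRunGoA, pvGo]
    split
    · rw [if_pos (show c + 1 > 0 by omega), ih (c + 1) _ (by omega)]
      simp [pvVal]
    · exact congrArg _ (ih c rv hc)

lemma tenRunGoA_zero (xs : List Int) : ∀ (rv : Int),
    tenRunGoA 0 rv xs = pvGo none xs := by
  induction xs with
  | nil => intro rv; rfl
  | cons x rest ih =>
    intro rv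
    simp only [tenRunGoA, pvGo]
    split
    · rw [if_pos (show (0:Int) + 1 > 0 by omega), tenRunGoA_pos rest (0 + 1) _ (by omega)]
      simp [pvVal]
    · exact congrArg _ (ih rv)

lemma pvShiftComp (l : List Nat) (i : Nat) :
    (l.map (· + 1)).map (· + i) = l.map (· + (i + 1)) := by
  rw [List.map_map]
  exact List.map_congr_left (fun m _ => by simp only [Function.comp_apply]; omega)

lemma marksGoB_shift (xs : List Int) : ∀ (i : Nat),
    marksGoB i xs = (marksGoB 0 xs).map (· + i) := by
  induction xs with
  | nil => intro i; rfl
  | cons x rest ih =>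
    intro i
    simp only [marksGoB]
    split
    · rw [ih (i + 1), ih 1, List.map_cons, Nat.zero_add, pvShiftComp]
    · rw [ih (i + 1), ih 1, pvShiftComp]

lemma seg_shift (x : Int) (xs : List Int) (ms : List Nat) : ∀ (bs : List Nat),
    ((ms.map (· + 1)).zip (bs.map (· + 1))).flatMap (pvSeg (x :: xs))
      = (ms.zip bs).flatMap (pvSeg xs) := by
  induction ms with
  | nil => intro bs; simp
  | cons m ms' ih =>
    intro bs
    cases bs with
    | nil => simp
    | cons b bs' =>
      simp only [List.map_cons, List.zip_cons_cons, List.flatMap_cons, ih bs']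
      congr 1
      simp [pvSeg, Nat.succ_sub_succ, List.getD]

-- pvGo with a live replacement value renders as a replicate prefix plus segments
lemma pvGo_some (xs : List Int) : ∀ (v : Int),
    pvGo (some v) xs =
      match marksGoB 0 xs with
      | [] => List.replicate xs.length v
      | m0 :: ms => List.replicate m0 v ++ ((m0 :: ms).zip (ms ++ [xs.length])).flatMap (pvSeg xs) := by
  induction xs with
  | nil => intro v; rfl
  | cons x rest ih =>
    intro v
    simp only [pvGo, marksGoB]
    split
    · -- x is a mark
      rw [ih (pvVal x), marksGoB_shift rest 1]
      rcases h : marksGoB 0 rest with _ | ⟨m0', ms'⟩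
      · simp [pvSeg, List.replicate_succ]
      · have hb : List.map (fun x => x + 1) ms' ++ [rest.length + 1] = List.map (fun x => x + 1) (ms' ++ [rest.length]) := by
          simp
        have hz := seg_shift x rest (m0' :: ms') (ms' ++ [rest.length])
        simp only [List.map_cons] at hz
        simp only [List.length_cons, List.replicate_zero, List.nil_append]
        simp [pvSeg, List.replicate_succ]
        rw [hb, hz]
    · -- x is not a mark
      rw [ih v, marksGoB_shift rest 1]
      rcases h : marksGoB 0 rest with _ | ⟨m0', ms'⟩
      · simp [List.replicate_succ]
      · have hb : List.map (fun x => x + 1) ms' ++ [rest.length + 1] = List.map (fun x => x + 1) (ms' ++ [rest.length]) := by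
          simp
        have hz := seg_shift x rest (m0' :: ms') (ms' ++ [rest.length])
        simp only [List.map_cons] at hz
        simp only [List.map_cons, List.length_cons, List.replicate_succ, List.cons_append, hb, hz]

lemma pvGo_none (xs : List Int) : pvGo none xs = pvRender xs := by
  induction xs with
  | nil => rfl
  | cons x rest ih =>
    simp only [pvGo, pvRender, marksGoB]
    split
    · -- x is a mark
      rw [pvGo_some rest (pvVal x), marksGoB_shift rest 1]
      rcases h : marksGoB 0 rest with _ | ⟨m0', ms'⟩
      · simp [pvSeg, List.replicate_succ]
      · have hb : List.map (fun x => x + 1) ms' ++ [rest.length + 1] = List.map (fun x => x + 1) (ms' ++ [rest.length]) := by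
          simp
        have hz := seg_shift x rest (m0' :: ms') (ms' ++ [rest.length])
        simp only [List.map_cons] at hz
        simp only [List.length_cons]
        simp [pvSeg, List.replicate_succ]
        rw [hb, hz]
    · -- x is not a mark
      rw [ih, pvRender, marksGoB_shift rest 1]
      rcases h : marksGoB 0 rest with _ | ⟨m0', ms'⟩
      · simp
      · have hb : List.map (fun x => x + 1) ms' ++ [rest.length + 1] = List.map (fun x => x + 1) (ms' ++ [rest.length]) := by
          simp
        have hz := seg_shift x rest (m0' :: ms') (ms' ++ [rest.length])
        simp only [List.map_cons] at hz
        simp only [List.map_cons, List.length_cons, List.take_succ_cons, List.cons_append, hb, hz]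

lemma tenRun_alt_eq_render (xs : List Int) : tenRun_alt xs = pvRender xs := by
  unfold tenRun_alt pvRender
  rcases h : marksGoB 0 xs with _ | ⟨m0, ms⟩
  · rfl
  · dsimp only
    rw [PySem.List.foldl_append_eq_flatMap]
    rfl

-- ===== VERDICT (by name: the statement is the Claim_ definition above) =====
theorem tenRun_spec : Claim_equal_tenRun := by
  intro numbers _
  show tenRun numbers = tenRun_alt numbers
  rw [tenRun, tenRunGoA_zero, pvGo_none, tenRun_alt_eq_render]
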